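-- pv_equiv track=rewrite | github.com/iamhassaan/Ethereum_analysis | PartB_job2.py | reducer_transactions
-- ===== SOURCE A (Python) =====
-- def reducer_transactions(to_address, values):
--
--     vals=0
--     vars=False
--
--     for value in values:
--         if value[1] == 1:
--             vals=value[0]
--         elif value[1]==2:
--             vars=True
--
--     if vars==True and vals>0:
--         x=(to_address,vals)
--         yield(None,x)
-- ===== SOURCE B (Python) =====
-- def reducer_transactions(to_address, values):
--     vs = list(values)
--     has2 = any(v[1] == 2 for v in vs)
--     matches = [v[0] for v in vs if v[1] == 1]
--     vals = matches[-1] if matches else 0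
--     if has2 and vals > 0:
--         yield (None, (to_address, vals))
-- ===== Notes on version B (the rewrite author's own statement) =====
-- stated objective: simpler
-- what changed: Replaces the fused single pass maintaining two mutable states with two separate declarative passes: an any() existence check for flag 2 and a comprehension extracting the last flag-1 payload.
import Mathlib
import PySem

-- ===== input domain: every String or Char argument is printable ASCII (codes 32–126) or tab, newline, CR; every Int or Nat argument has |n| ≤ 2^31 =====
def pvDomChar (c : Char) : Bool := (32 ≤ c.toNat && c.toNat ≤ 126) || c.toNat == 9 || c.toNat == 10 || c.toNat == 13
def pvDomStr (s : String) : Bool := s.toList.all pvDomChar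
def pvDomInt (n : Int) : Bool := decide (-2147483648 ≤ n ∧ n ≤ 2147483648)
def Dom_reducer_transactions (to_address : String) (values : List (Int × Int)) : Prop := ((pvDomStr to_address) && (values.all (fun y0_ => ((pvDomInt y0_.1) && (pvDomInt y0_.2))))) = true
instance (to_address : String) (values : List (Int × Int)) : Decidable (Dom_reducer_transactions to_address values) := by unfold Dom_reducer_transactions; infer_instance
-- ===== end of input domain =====

-- B replaces A's fused single-pass fold over two mutable states with two separate declarative passes (any-existence check + last flag-1 payload); objective: simpler.

-- ===== PORT A =====
-- Port of A: single foldl carrying (vals, vars), then the final guard.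
def reducer_transactions (to_address : String) (values : List (Int × Int)) : List (Option String × (String × Int)) :=
  let st := values.foldl
    (fun (s : Int × Bool) value =>
      if value.2 == 1 then (value.1, s.2)
      else if value.2 == 2 then (s.1, true)
      else s) (0, false)
  if st.2 = true ∧ st.1 > 0 then [(none, (to_address, st.1))] else []

-- ===== PORT B =====
-- Port of B: two separate passes (any + filter/map with last element), then the same guard.
def reducer_transactions_alt (to_address : String) (values : List (Int × Int)) : List (Option String × (String × Int)) :=
  let vars := values.any (fun v => v.2 == 2)
  let ms := (values.filter (fun v => v.2 == 1)).map Prod.fst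
  let vals := ms.getLast?.getD 0
  if vars ∧ vals > 0 then [(none, (to_address, vals))] else []

-- ===== PRECONDITION & SPEC =====
def Spec_reducer_transactions (to_address : String) (values : List (Int × Int)) (out : List (Option String × (String × Int))) : Prop := out = reducer_transactions_alt to_address values
instance (to_address : String) (values : List (Int × Int)) (out : List (Option String × (String × Int))) : Decidable (Spec_reducer_transactions to_address values out) := by unfold Spec_reducer_transactions; infer_instance

-- ===== CLAIM (what is proved, stated in full; the proofs are below) =====
def Claim_equal_reducer_transactions : Prop := ∀ (to_address : String) (values : List (Int × Int)), Dom_reducer_transactions to_address values → Spec_reducer_transactions to_address values (reducer_transactions to_address values)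

-- ===== LEMMAS AND PROOFS =====

-- ===== VERDICT (by name: the statement is the Claim_ definition above) =====
-- Proof helper: last element of a list with a default (matches[-1] if matches else d).
def pvLastD (l : List Int) (d : Int) : Int :=
  match l with
  | [] => d
  | a :: t => pvLastD t a

theorem pvGetD_cons_irrel : ∀ (t : List Int) (b d e : Int),
    ((b :: t).getLast?).getD d = ((b :: t).getLast?).getD e := by
  intro t
  induction t with
  | nil => intro b d e; rfl
  | cons c t ih =>
    intro b d e
    rw [List.getLast?_cons_cons]
    exact ih c d e

theorem pvLastD_eq (l : List Int) : ∀ (d : Int), pvLastD l d = l.getLast?.getD d := by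
  induction l with
  | nil => intro d; rfl
  | cons a t ih =>
    intro d
    cases t with
    | nil => rfl
    | cons b t' =>
      calc pvLastD (a :: b :: t') d = (b :: t').getLast?.getD a := ih a
        _ = (b :: t').getLast?.getD d := pvGetD_cons_irrel t' b a d
        _ = (a :: b :: t').getLast?.getD d := by rw [List.getLast?_cons_cons]

-- Loop invariant: the fold's final state from (s, b) is (last flag-1 payload with default s, b || any flag-2).
theorem pv_fold_char (values : List (Int × Int)) : ∀ (s : Int) (b : Bool),
    values.foldl
      (fun (s : Int × Bool) value =>
        if value.2 == 1 then (value.1, s.2)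
        else if value.2 == 2 then (s.1, true)
        else s) (s, b)
    = (pvLastD ((values.filter (fun v => v.2 == 1)).map Prod.fst) s,
       b || values.any (fun v => v.2 == 2)) := by
  induction values with
  | nil => intro s b; simp [pvLastD]
  | cons v vs ih =>
    intro s b
    by_cases h1 : (v.2 == 1) = true
    · have h2 : (v.2 == 2) = false := by
        simp only [beq_iff_eq, beq_eq_false_iff_ne] at h1 ⊢; omega
      rw [List.foldl_cons, if_pos h1, ih]
      simp [h1, h2, pvLastD, List.filter_cons]
    · by_cases h2 : (v.2 == 2) = true
      · rw [List.foldl_cons, if_neg h1, if_pos h2, ih]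
        simp [h1, h2]
      · rw [List.foldl_cons, if_neg h1, if_neg h2, ih]
        simp [h1, h2]

theorem reducer_transactions_spec : Claim_equal_reducer_transactions := by
  intro to_address values _
  unfold Spec_reducer_transactions reducer_transactions reducer_transactions_alt
  rw [pv_fold_char]
  simp only [pvLastD_eq, Bool.false_or]
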